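-- pv_equiv track=rewrite | github.com/tksimson/BigFoot | bigfoot/utils.py | validate_repo_name
-- ===== SOURCE A (Python) =====
-- def validate_repo_name(repo: str) -> bool:
--     """Validate repository name format.
--
--     Args:
--         repo: Repository name to validate
--
--     Returns:
--         True if valid format, False otherwise
--     """
--     if not repo or '/' not in repo:
--         return False
--
--     parts = repo.split('/')
--     if len(parts) != 2:
--         return False
--
--     owner, repo_name = parts
--     if not owner or not repo_name:
--         return False
--
--     # Basic validation - no spaces, special chars
--     if ' ' in repo or any(char in repo for char in ['<', '>', ':', '"', '|', '?', '*']):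
--         return False
--
--     return True
-- ===== SOURCE B (Python) =====
-- def validate_repo_name(repo: str) -> bool:
--     """Validate repository name format (single pass: owner scan, then name scan)."""
--     BAD = ' <>:"|?*'
--     it = iter(repo)
--     n = 0  # length of owner segment
--     for ch in it:
--         if ch in BAD:
--             return False
--         if ch == '/':
--             break
--         n += 1
--     else:
--         return False  # no slash at all
--     if n == 0:
--         return False
--     m = 0  # length of name segment
--     for ch in it:
--         if ch in BAD or ch == '/':
--             return False
--         m += 1
--     return m > 0
-- ===== Notes on version B (the rewrite author's own statement) =====
-- stated objective: alternative
-- what changed: Replaces A's split-into-parts pipeline (membership test, split('/'), length/emptiness checks, then per-character membership rescans of the whole string) with a single left-to-right two-phase scan: scan the owner segment up to the unique '/', then the name segment, rejecting forbidden characters and empty segments on the fly.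
import Mathlib
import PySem

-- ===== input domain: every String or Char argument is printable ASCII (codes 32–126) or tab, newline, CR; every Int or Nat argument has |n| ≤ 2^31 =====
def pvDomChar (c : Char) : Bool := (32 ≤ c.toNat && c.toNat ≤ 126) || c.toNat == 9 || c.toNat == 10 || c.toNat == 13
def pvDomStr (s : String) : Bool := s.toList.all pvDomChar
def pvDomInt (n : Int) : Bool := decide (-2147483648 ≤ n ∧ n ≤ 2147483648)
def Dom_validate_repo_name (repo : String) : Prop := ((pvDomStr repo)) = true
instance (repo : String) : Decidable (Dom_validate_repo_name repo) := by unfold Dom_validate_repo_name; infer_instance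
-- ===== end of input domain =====

-- B replaces A's split/length/emptiness/rescans pipeline by one two-phase left-to-right scan; same cost, different structure.

-- ===== PORT A =====
-- A works on the string's characters; split('/') is PySem.Chars.splitOn on the code points (exact).
def validate_repo_name (repo : String) : Bool :=
  if repo.toList = [] || !(PySem.Chars.isIn ['/'] repo.toList) then false
  else if (PySem.Chars.splitOn repo.toList ['/']).length ≠ 2 then false
  else
    match PySem.Chars.splitOn repo.toList ['/'] with
    | [owner, repo_name] =>
      if owner = [] || repo_name = [] then false
      else if PySem.Chars.isIn [' '] repo.toList
           || [['<'], ['>'], [':'], ['"'], ['|'], ['?'], ['*']].any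
                (fun ch => PySem.Chars.isIn ch repo.toList) then false
      else true
    | _ => false

-- ===== PORT B =====
def pvBadChar (c : Char) : Bool := c ∈ [' ', '<', '>', ':', '"', '|', '?', '*']

-- second phase of B's scan: the name segment after the slash (m = characters seen so far)
def pvGoName : List Char → Nat → Bool
  | [], m => decide (0 < m)
  | c :: rest, m => if pvBadChar c || c == '/' then false else pvGoName rest (m + 1)

-- first phase of B's scan: the owner segment (n = characters seen so far)
def pvGoOwner : List Char → Nat → Bool
  | [], _ => false
  | c :: rest, n =>
    if pvBadChar c then false
    else if c == '/' then decide (0 < n) && pvGoName rest 0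
    else pvGoOwner rest (n + 1)

def validate_repo_name_alt (repo : String) : Bool := pvGoOwner repo.toList 0

-- ===== PRECONDITION & SPEC =====
def Spec_validate_repo_name (repo : String) (out : Bool) : Prop := out = validate_repo_name_alt repo
instance (repo : String) (out : Bool) : Decidable (Spec_validate_repo_name repo out) := by unfold Spec_validate_repo_name; infer_instance

-- ===== CLAIM (what is proved, stated in full; the proofs are below) =====
def Claim_equal_validate_repo_name : Prop := ∀ (repo : String), Dom_validate_repo_name repo → Spec_validate_repo_name repo (validate_repo_name repo)

-- ===== LEMMAS AND PROOFS =====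

-- the common characterisation: all characters allowed, and the string is owner ++ '/' ++ name
def pvOK (l : List Char) : Prop :=
  (∀ c ∈ l, pvBadChar c = false) ∧
  ∃ o m, l = o ++ '/' :: m ∧ '/' ∉ o ∧ '/' ∉ m ∧ o ≠ [] ∧ m ≠ []

lemma pv_go_eq (fuel : Nat) (l cur : List Char) (acc : List (List Char))
    (h : l.length ≤ fuel) :
    PySem.Chars.splitOn.go ['/'] fuel l cur acc
      = acc.reverse ++ (l.splitOnP (· == '/')).modifyHead (cur.reverse ++ ·) := by
  induction fuel generalizing l cur acc with
  | zero =>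
    have : l = [] := by cases l <;> simp_all
    subst this
    simp [PySem.Chars.splitOn.go, List.splitOnP_nil]
  | succ fuel ih =>
    cases l with
    | nil => simp [PySem.Chars.splitOn.go, List.splitOnP_nil]
    | cons c rest =>
      by_cases hc : c = '/'
      · subst hc
        have : List.isPrefixOf ['/'] ('/' :: rest) = true := by simp [List.isPrefixOf]
        rw [PySem.Chars.splitOn.go]
        simp only [this, if_pos]
        rw [ih _ _ _ (by simpa using Nat.le_of_succ_le_succ h)]
        obtain ⟨hd, tl, hsp⟩ := List.exists_cons_of_ne_nil (List.splitOnP_ne_nil (· == '/') rest)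
        simp [List.splitOnP_cons, hsp, List.modifyHead]
      · have : List.isPrefixOf ['/'] (c :: rest) = false := by
          simp [List.isPrefixOf]; exact fun h => absurd h.symm hc
        rw [PySem.Chars.splitOn.go]
        simp only [this, Bool.false_eq_true, if_neg, not_false_iff]
        rw [ih _ _ _ (by simpa using Nat.le_of_succ_le_succ h)]
        obtain ⟨hd, tl, hsp⟩ := List.exists_cons_of_ne_nil (List.splitOnP_ne_nil (· == '/') rest)
        simp [List.splitOnP_cons, hsp, List.modifyHead, hc]

lemma pv_splitOn_eq (l : List Char) :
    PySem.Chars.splitOn l ['/'] = l.splitOnP (· == '/') := by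
  unfold PySem.Chars.splitOn
  rw [pv_go_eq _ _ _ _ (by omega)]
  obtain ⟨hd, tl, hsp⟩ := List.exists_cons_of_ne_nil (List.splitOnP_ne_nil (· == '/') l)
  simp [hsp, List.modifyHead]

lemma pv_splitOnP_single_iff (l m : List Char) :
    l.splitOnP (· == '/') = [m] ↔ (l = m ∧ '/' ∉ m) := by
  constructor
  · induction l generalizing m with
    | nil => intro h; simp [List.splitOnP_nil] at h; subst h; exact ⟨rfl, by simp⟩
    | cons c rest ih =>
      intro h
      by_cases hc : c = '/'
      · subst hc
        simp [List.splitOnP_cons] at h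
        exact absurd h.2 (List.splitOnP_ne_nil _ _)
      · obtain ⟨hd, tl, hsp⟩ := List.exists_cons_of_ne_nil (List.splitOnP_ne_nil (· == '/') rest)
        rw [List.splitOnP_cons] at h
        simp [hc, hsp, List.modifyHead] at h
        obtain ⟨h1, h2⟩ := h
        obtain ⟨he, hm⟩ := ih (m := hd) (by rw [hsp, h2])
        constructor
        · simp [← h1, he]
        · simp [← h1]
          exact ⟨fun hh => hc hh.symm, hm⟩
  · rintro ⟨rfl, hm⟩
    exact List.splitOnP_eq_single _ _ (by intro x hx hh; rw [beq_iff_eq] at hh; exact hm (hh ▸ hx))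

lemma pv_splitOnP_pair_iff (l o m : List Char) :
    l.splitOnP (· == '/') = [o, m] ↔ (l = o ++ '/' :: m ∧ '/' ∉ o ∧ '/' ∉ m) := by
  constructor
  · induction l generalizing o with
    | nil => intro h; simp [List.splitOnP_nil] at h
    | cons c rest ih =>
      intro h
      by_cases hc : c = '/'
      · subst hc
        simp only [List.splitOnP_cons, beq_self_eq_true, if_true] at h
        injection h with ho hrest
        subst ho
        obtain ⟨rfl, hm⟩ := (pv_splitOnP_single_iff rest m).1 hrest
        exact ⟨by simp, by simp, hm⟩
      · obtain ⟨hd, tl, hsp⟩ := List.exists_cons_of_ne_nil (List.splitOnP_ne_nil (· == '/') rest)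
        rw [List.splitOnP_cons] at h
        simp [hc, hsp, List.modifyHead] at h
        obtain ⟨h1, h2⟩ := h
        obtain ⟨he, ho, hm⟩ := ih (o := hd) (by rw [hsp, h2])
        refine ⟨by simp [← h1, he], ?_, hm⟩
        simp [← h1]
        exact ⟨fun hh => hc hh.symm, ho⟩
  · rintro ⟨rfl, ho, hm⟩
    rw [List.splitOnP_first _ _ (by intro x hx hh; rw [beq_iff_eq] at hh; exact ho (hh ▸ hx)) '/' (by simp)]
    rw [List.splitOnP_eq_single _ _ (by intro x hx hh; rw [beq_iff_eq] at hh; exact hm (hh ▸ hx))]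

lemma pv_isIn_singleton (c : Char) (l : List Char) :
    PySem.Chars.isIn [c] l = true ↔ c ∈ l := by
  rw [PySem.Chars.isIn_iff_infix]
  constructor
  · exact fun h => h.mem (by simp)
  · intro h
    obtain ⟨s, t, rfl⟩ := List.append_of_mem h
    exact ⟨s, t, by simp⟩

lemma pv_A_iff (repo : String) : validate_repo_name repo = true ↔ pvOK repo.toList := by
  unfold validate_repo_name
  rw [pv_splitOn_eq]
  generalize repo.toList = l
  rcases h : l.splitOnP (· == '/') with _ | ⟨o, _ | ⟨m, rest⟩⟩
  · exact absurd h (List.splitOnP_ne_nil _ _)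
  · -- one piece: no '/' in l at all
    obtain ⟨rfl, hno⟩ := (pv_splitOnP_single_iff _ _).1 h
    have hIn : PySem.Chars.isIn ['/'] l = false := by
      rw [Bool.eq_false_iff]; intro hx; exact hno ((pv_isIn_singleton _ _).1 hx)
    rw [if_pos (by simp [hIn])]
    constructor
    · intro hv; exact absurd hv (by simp)
    · rintro ⟨-, o', m', hdec, -⟩
      exact (hno (by simp [hdec] : '/' ∈ l)).elim
  · cases rest with
    | cons x rest' =>
      -- three or more pieces: the length-2 test fails
      constructor
      · intro hv
        split_ifs at hv with h1 h2
      · rintro ⟨-, o', m', hdec, ho', hm', -, -⟩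
        have hp := (pv_splitOnP_pair_iff l o' m').2 ⟨hdec, ho', hm'⟩
        rw [h] at hp
        simp at hp
    | nil =>
      -- exactly two pieces
      obtain ⟨hl, ho, hm⟩ := (pv_splitOnP_pair_iff l o m).1 h
      subst hl
      have h1 : ¬(decide ((o ++ '/' :: m) = []) || !PySem.Chars.isIn ['/'] (o ++ '/' :: m)) = true := by
        have : PySem.Chars.isIn ['/'] (o ++ '/' :: m) = true :=
          (pv_isIn_singleton '/' _).2 (by simp)
        simp [this]
      rw [if_neg h1, if_neg (by simp : ¬(([o, m] : List (List Char)).length ≠ 2))]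
      split
      next owner name heq =>
        injection heq with e1 e2; injection e2 with e2 e3
        subst e1; subst e2
        constructor
        · intro hv
          split_ifs at hv with hA hB
          simp only [Bool.or_eq_true, decide_eq_true_eq, not_or] at hA
          simp only [Bool.or_eq_true, List.any_eq_true, not_or] at hB
          push_neg at hB
          obtain ⟨hsp, hrest⟩ := hB
          have hsp' : ' ' ∉ (o ++ '/' :: m) := fun hmem => hsp ((pv_isIn_singleton _ _).2 hmem)
          refine ⟨?_, o, m, rfl, ho, hm, hA.1, hA.2⟩
          intro c hc
          simp only [pvBadChar, List.mem_cons, List.not_mem_nil, or_false,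
            decide_eq_false_iff_not]
          rintro (rfl | rfl | rfl | rfl | rfl | rfl | rfl | rfl)
          · exact hsp' hc
          all_goals
            exact absurd ((pv_isIn_singleton _ _).2 hc) (by simpa using hrest _ (by simp))
        · rintro ⟨hbad, o', m', hdec, ho', hm', hone', htwo'⟩
          have hp := (pv_splitOnP_pair_iff _ o' m').2 ⟨hdec, ho', hm'⟩
          rw [h] at hp
          injection hp with e1 e2; injection e2 with e2 e3
          subst e1; subst e2
          have hnotin : ∀ c, pvBadChar c = true →
              PySem.Chars.isIn [c] (o ++ '/' :: m) = false := by
            intro c hc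
            rw [Bool.eq_false_iff]
            intro hInc
            have := hbad c ((pv_isIn_singleton _ _).1 hInc)
            simp [this] at hc
          simp [hone', htwo', hnotin ' ' (by decide), hnotin '<' (by decide),
            hnotin '>' (by decide), hnotin ':' (by decide), hnotin '"' (by decide),
            hnotin '|' (by decide), hnotin '?' (by decide), hnotin '*' (by decide)]
      next hne2 => exact absurd rfl (hne2 o m)

lemma pv_goName_iff (l : List Char) (m : Nat) :
    pvGoName l m = true ↔ ((∀ c ∈ l, pvBadChar c = false ∧ c ≠ '/') ∧ 0 < m + l.length) := by
  induction l generalizing m with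
  | nil => simp [pvGoName]
  | cons c rest ih =>
    simp only [pvGoName]
    by_cases hb : pvBadChar c = true
    · simp [hb]
    · by_cases hc : c = '/'
      · subst hc; simp
      · rw [Bool.not_eq_true] at hb
        simp only [hb, Bool.false_or, beq_iff_eq]
        rw [if_neg (by simpa using hc), ih]
        constructor
        · rintro ⟨h1, -⟩
          refine ⟨?_, by simp only [List.length_cons]; omega⟩
          intro x hx
          rcases List.mem_cons.1 hx with rfl | hx'
          · exact ⟨hb, hc⟩
          · exact h1 x hx'
        · rintro ⟨h1, -⟩
          exact ⟨fun x hx => h1 x (List.mem_cons_of_mem _ hx), by omega⟩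

lemma pv_goOwner_iff (l : List Char) (n : Nat) :
    pvGoOwner l n = true ↔
      ∃ o m, l = o ++ '/' :: m ∧ '/' ∉ o ∧ (∀ c ∈ o, pvBadChar c = false) ∧
        0 < n + o.length ∧ (∀ c ∈ m, pvBadChar c = false ∧ c ≠ '/') ∧ m ≠ [] := by
  induction l generalizing n with
  | nil =>
    simp only [pvGoOwner]
    constructor
    · intro hv; exact absurd hv (by simp)
    · rintro ⟨o, m, hdec, -⟩; exact absurd hdec (by simp)
  | cons c rest ih =>
    simp only [pvGoOwner]
    by_cases hb : pvBadChar c = true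
    · have hcs : c ≠ '/' := by rintro rfl; simp [pvBadChar] at hb
      simp only [hb, if_true]
      constructor
      · intro hv; exact absurd hv (by simp)
      · rintro ⟨o, m, hdec, hno, hob, -, -, -⟩
        cases o with
        | nil => simp at hdec; exact (hcs hdec.1).elim
        | cons y o' =>
          simp at hdec
          exact absurd (hob y (by simp)) (by simp [← hdec.1, hb])
    · rw [Bool.not_eq_true] at hb
      by_cases hc : c = '/'
      · subst hc
        rw [if_neg (by simp [hb]), if_pos (by simp)]
        rw [Bool.and_eq_true, pv_goName_iff]
        constructor
        · rintro ⟨hn, hrest, hlen⟩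
          refine ⟨[], rest, by simp, by simp, by simp, by simpa using hn, hrest, ?_⟩
          rintro rfl; simp at hlen
        · rintro ⟨o, m, hdec, hno, -, hn, hm, hmne⟩
          cases o with
          | nil =>
            simp at hdec
            subst hdec
            refine ⟨by simpa using hn, hm, ?_⟩
            cases rest with
            | nil => exact (hmne rfl).elim
            | cons _ _ => simp only [List.length_cons]; omega
          | cons y o' =>
            simp at hdec
            exact (hno (List.mem_cons.2 (Or.inl hdec.1))).elim
      · rw [if_neg (by simp [hb]), if_neg (by simpa using hc), ih]
        constructor
        · rintro ⟨o, m, hdec, hno, hob, -, hm, hmne⟩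
          refine ⟨c :: o, m, by simp [hdec], ?_, ?_, by simp, hm, hmne⟩
          · intro hh
            rcases List.mem_cons.1 hh with h1 | h1
            · exact hc h1.symm
            · exact hno h1
          · intro x hx
            rcases List.mem_cons.1 hx with rfl | h1
            · exact hb
            · exact hob x h1
        · rintro ⟨o, m, hdec, hno, hob, -, hm, hmne⟩
          cases o with
          | nil => simp at hdec; exact (hc hdec.1).elim
          | cons y o' =>
            simp at hdec
            obtain ⟨rfl, hrest⟩ := hdec
            refine ⟨o', m, hrest, fun hh => hno (List.mem_cons_of_mem _ hh), ?_, by omega, hm, hmne⟩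
            exact fun z hz => hob z (List.mem_cons_of_mem _ hz)

lemma pv_B_iff (repo : String) : validate_repo_name_alt repo = true ↔ pvOK repo.toList := by
  unfold validate_repo_name_alt pvOK
  generalize repo.toList = l
  rw [pv_goOwner_iff]
  constructor
  · rintro ⟨o, m, hdec, hno, hob, hn, hm, hmne⟩
    refine ⟨?_, o, m, hdec, hno, fun h => (hm '/' h).2 rfl, ?_, hmne⟩
    · intro c hc
      rw [hdec] at hc
      rcases List.mem_append.1 hc with h | h
      · exact hob c h
      · rcases List.mem_cons.1 h with h | h
        · simp [h, pvBadChar]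
        · exact (hm c h).1
    · rintro rfl; simp at hn
  · rintro ⟨hbad, o, m, rfl, hno, hnm, hone, htwo⟩
    refine ⟨o, m, rfl, hno, fun c hc => hbad c (by simp [hc]), ?_, ?_, htwo⟩
    · cases o with
      | nil => exact (hone rfl).elim
      | cons _ _ => simp only [List.length_cons]; omega
    · exact fun c hc => ⟨hbad c (by simp [hc]), fun hh => hnm (hh ▸ hc)⟩

-- ===== VERDICT (by name: the statement is the Claim_ definition above) =====
theorem validate_repo_name_spec : Claim_equal_validate_repo_name := by
  intro repo _
  unfold Spec_validate_repo_name
  rw [Bool.eq_iff_iff, pv_A_iff, pv_B_iff]
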